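-- pv_equiv track=rewrite | github.com/MCresearch/deep-light | machinelearning_opt/light/Zernike.py | maxZernike
-- ===== SOURCE A (Python) =====
-- def maxZernike(nk):
--
--     maxZernike = 0
--     l = 0
--     ni = 0
--     m0 = 0
--     m1 = 0
--     m = 0
--     for ni in range(1,nk+1):
--
--         m0 = ni - 2 * (int)(ni / 2)
--         m1 = m0 + 2 * (int)(ni / 2)
--         for m in range(m0,m1+1,2):
--             l = l + 1
--             if m != 0:
--                 l = l+1
--     return l
-- ===== SOURCE B (Python) =====
-- def maxZernike(nk):
--     # closed form: each order ni contributes ni + 1 modes, so the total is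
--     # sum_{ni=1}^{nk} (ni + 1) = nk * (nk + 3) / 2
--     if nk < 1:
--         return 0
--     return nk * (nk + 3) // 2
-- ===== Notes on version B (the rewrite author's own statement) =====
-- stated objective: faster
-- what changed: replaces the doubly nested loop over orders and azimuthal frequencies by the closed-form sum nk*(nk+3)//2 (each order ni contributes ni+1 modes)
import Mathlib
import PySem

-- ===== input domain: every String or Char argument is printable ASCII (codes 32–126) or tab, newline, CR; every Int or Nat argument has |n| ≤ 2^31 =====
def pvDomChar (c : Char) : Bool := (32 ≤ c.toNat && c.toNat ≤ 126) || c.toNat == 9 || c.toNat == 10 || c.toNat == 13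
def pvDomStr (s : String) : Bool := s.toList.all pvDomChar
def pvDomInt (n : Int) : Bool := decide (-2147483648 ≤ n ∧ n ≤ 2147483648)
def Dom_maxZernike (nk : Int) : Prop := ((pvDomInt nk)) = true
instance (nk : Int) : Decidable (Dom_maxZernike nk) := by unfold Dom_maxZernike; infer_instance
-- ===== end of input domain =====

-- B replaces A's doubly nested counting loop by the closed form nk*(nk+3)//2 (faster: O(1) vs O(nk^2)).


-- ===== PORT A =====
-- (int)(ni / 2): float division then truncation toward zero = Int.tdiv; exact on Dom (|ni| ≤ 2^31 < 2^52)
def maxZernike (nk : Int) : Int :=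
  (PySem.List.pyRange 1 (nk + 1) 1).foldl (fun l ni =>
    let m0 := ni - 2 * ni.tdiv 2
    let m1 := m0 + 2 * ni.tdiv 2
    (PySem.List.pyRange m0 (m1 + 1) 2).foldl (fun l m =>
      let l := l + 1
      if m ≠ 0 then l + 1 else l) l) 0

-- ===== PORT B =====
def maxZernike_alt (nk : Int) : Int :=
  if nk < 1 then 0 else PySem.Int.floordiv (nk * (nk + 3)) 2

-- ===== PRECONDITION & SPEC =====
def Spec_maxZernike (nk : Int) (out : Int) : Prop := out = maxZernike_alt nk
instance (nk : Int) (out : Int) : Decidable (Spec_maxZernike nk out) := by unfold Spec_maxZernike; infer_instance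

-- ===== CLAIM (what is proved, stated in full; the proofs are below) =====
def Claim_equal_maxZernike : Prop := ∀ (nk : Int), Dom_maxZernike nk → Spec_maxZernike nk (maxZernike nk)

-- ===== LEMMAS AND PROOFS =====

-- the inner loop over m adds exactly ni + 1 to the accumulator
lemma maxZernike_inner (ni l : Int) (hni : 1 ≤ ni) :
    (PySem.List.pyRange (ni - 2 * ni.tdiv 2) ((ni - 2 * ni.tdiv 2) + 2 * ni.tdiv 2 + 1) 2).foldl
      (fun l m => let l := l + 1; if m ≠ 0 then l + 1 else l) l = l + (ni + 1) := by
  have htd : ni.tdiv 2 = ni / 2 := Int.tdiv_eq_ediv_of_nonneg (by omega)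
  rw [htd]
  set m0 : Int := ni - 2 * (ni / 2) with hm0
  have hrange : m0 + 2 * (ni / 2) + 1 = ni + 1 := by omega
  rw [hrange]
  have hbody : (fun (l m : Int) => let l := l + 1; if m ≠ 0 then l + 1 else l)
      = fun (l m : Int) => l + (if m = 0 then 1 else 2) := by
    funext l m; by_cases h : m = 0 <;> simp [h]
    omega
  rw [hbody, PySem.List.foldl_add]
  rw [PySem.List.pyRange_of_pos _ _ (by norm_num : (0:Int) < 2)]
  have hlt : m0 < ni + 1 := by omega
  rw [if_pos hlt, List.map_map]
  have hm01 : m0 = 0 ∨ m0 = 1 := by omega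
  rcases hm01 with h0 | h1
  · -- ni even
    have hn : ((ni + 1 - m0 + 2 - 1) / 2).toNat = (ni / 2).toNat + 1 := by omega
    rw [hn, List.range_succ_eq_map, List.map_cons, List.sum_cons]
    have : List.map ((fun m => if m = 0 then (1:Int) else 2) ∘ fun k : ℕ => m0 + 2 * ↑k) (List.map Nat.succ (List.range (ni / 2).toNat))
        = List.map (fun _ : ℕ => (2:Int)) (List.range (ni / 2).toNat) := by
      rw [List.map_map]
      refine List.map_congr_left ?_
      intro k _
      simp only [Function.comp]
      rw [if_neg (by push_cast; omega)]
    rw [this, PySem.List.sum_map_const_int, List.length_range]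
    simp only [Function.comp, h0]
    rw [if_pos (by norm_num)]
    omega
  · -- ni odd
    have : List.map ((fun m => if m = 0 then (1:Int) else 2) ∘ fun k : ℕ => m0 + 2 * ↑k) (List.range ((ni + 1 - m0 + 2 - 1) / 2).toNat)
        = List.map (fun _ : ℕ => (2:Int)) (List.range ((ni + 1 - m0 + 2 - 1) / 2).toNat) := by
      refine List.map_congr_left ?_
      intro k _
      simp only [Function.comp]
      rw [if_neg (by omega)]
    rw [this, PySem.List.sum_map_const_int, List.length_range]
    omega

lemma maxZernike_loop (nk : Int) : maxZernike nk = maxZernike_alt nk := by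
  unfold maxZernike maxZernike_alt
  rw [PySem.List.foldl_congr_mem _ _
      (fun l ni => l + (ni + 1)) 0
      (by
        intro acc ni hni
        have h1 : 1 ≤ ni := ((PySem.List.mem_pyRange_one).1 hni).1
        simpa using maxZernike_inner ni acc h1)]
  rw [PySem.List.foldl_add]
  rw [PySem.List.pyRange_one]
  rw [List.map_map]
  by_cases h : nk < 1
  · have h0 : nk.toNat = 0 := by omega
    have h1 : (nk + 1 - 1).toNat = 0 := by omega
    simp [h0, if_pos h]
  · rw [if_neg h]
    have key : ∀ N : ℕ, (List.map ((fun ni : Int => ni + 1) ∘ fun k : ℕ => 1 + ↑k) (List.range N)).sum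
        = (N : Int) * (N + 3) / 2 := by
      intro N
      induction N with
      | zero => simp
      | succ n ih =>
        rw [List.range_succ, List.map_append, List.sum_append, ih]
        simp only [List.map_cons, List.map_nil, List.sum_cons, List.sum_nil, Function.comp]
        push_cast
        have h2 : ((n:Int) + 1) * ((n:Int) + 1 + 3) = (n:Int) * ((n:Int) + 3) + 2 * ((n:Int) + 2) := by ring
        omega
    rw [key]
    have hN : ((nk + 1 - 1).toNat : Int) = nk := by omega
    rw [hN]
    simp only [PySem.Int.floordiv]
    rw [Int.fdiv_eq_ediv]
    simp

-- ===== VERDICT (by name: the statement is the Claim_ definition above) =====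
theorem maxZernike_spec : Claim_equal_maxZernike := by
  intro nk _
  exact maxZernike_loop nk
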